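-- pv_equiv track=rewrite | github.com/doddi321/forritun_profbudir2021 | lokaprof2019/isbn/isbn.py | are_seperators_in_correct_positions
-- ===== SOURCE A (Python) =====
-- SEPERATOR_INDEXES = [1, 5, 11]
--
-- SEPERATOR = '-'
--
-- def are_seperators_in_correct_positions(isbn_string: str):
--     seperator_counter = 0
--     for index, char in enumerate(isbn_string):
--         if char == SEPERATOR:
--             seperator_counter += 1
--             if index not in SEPERATOR_INDEXES:
--                 return False
--     return len(SEPERATOR_INDEXES) == seperator_counter
-- ===== SOURCE B (Python) =====
-- SEPERATOR_INDEXES = [1, 5, 11]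
--
-- SEPERATOR = '-'
--
-- def are_seperators_in_correct_positions(isbn_string: str):
--     dash_positions = {index for index, char in enumerate(isbn_string) if char == SEPERATOR}
--     return dash_positions == set(SEPERATOR_INDEXES)
-- ===== Notes on version B (the rewrite author's own statement) =====
-- stated objective: simpler
-- what changed: Replaces the running counter, per-character membership test and early return with one comprehension collecting the dash positions and a single set-equality against {1,5,11}.
import Mathlib
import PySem

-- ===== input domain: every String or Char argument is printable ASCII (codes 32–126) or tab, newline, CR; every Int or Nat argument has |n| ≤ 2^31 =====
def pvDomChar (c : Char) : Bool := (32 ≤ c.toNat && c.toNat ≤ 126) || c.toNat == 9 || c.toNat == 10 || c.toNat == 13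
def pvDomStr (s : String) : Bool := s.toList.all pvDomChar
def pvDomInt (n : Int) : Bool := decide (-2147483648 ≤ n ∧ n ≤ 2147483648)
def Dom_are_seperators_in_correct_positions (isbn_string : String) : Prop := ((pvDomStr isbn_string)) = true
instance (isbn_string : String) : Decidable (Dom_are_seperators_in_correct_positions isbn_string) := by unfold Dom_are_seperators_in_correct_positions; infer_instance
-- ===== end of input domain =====

-- B replaces A's running counter, per-character membership test and early return
-- with one comprehension collecting the dash positions and a single set-equality.

-- SEPERATOR_INDEXES = [1, 5, 11]
def pvSeperatorIndexes : List Int := [1, 5, 11]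

-- ===== PORT A =====
-- the for-loop with early return, carrying (index, seperator_counter)
def pvGoA : List Char → Int → Int → Bool
  | [], _, cnt => decide ((pvSeperatorIndexes.length : Int) = cnt)
  | c :: rest, idx, cnt =>
    if c == '-' then
      if pvSeperatorIndexes.contains idx then pvGoA rest (idx + 1) (cnt + 1)
      else false
    else pvGoA rest (idx + 1) cnt

def are_seperators_in_correct_positions (isbn_string : String) : Bool :=
  pvGoA isbn_string.toList 0 0

-- ===== PORT B =====
def are_seperators_in_correct_positions_alt (isbn_string : String) : Bool :=
  PySem.Set.equal
    (PySem.Set.ofList (((PySem.List.enumerate isbn_string.toList 0).filter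
        (fun p => p.2 == '-')).map (·.1)))
    (PySem.Set.ofList pvSeperatorIndexes)

-- ===== PRECONDITION & SPEC =====
def Spec_are_seperators_in_correct_positions (isbn_string : String) (out : Bool) : Prop := out = are_seperators_in_correct_positions_alt isbn_string
instance (isbn_string : String) (out : Bool) : Decidable (Spec_are_seperators_in_correct_positions isbn_string out) := by unfold Spec_are_seperators_in_correct_positions; infer_instance

-- ===== CLAIM (what is proved, stated in full; the proofs are below) =====
def Claim_equal_are_seperators_in_correct_positions : Prop := ∀ (isbn_string : String), Dom_are_seperators_in_correct_positions isbn_string → Spec_are_seperators_in_correct_positions isbn_string (are_seperators_in_correct_positions isbn_string)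

-- ===== LEMMAS AND PROOFS =====

/-- the dash positions of `l` when enumeration starts at `i` -/
def pvDashes (l : List Char) (i : Int) : List Int :=
  ((PySem.List.enumerate l i).filter (fun p => p.2 == '-')).map (·.1)

theorem pvDashes_nil (i : Int) : pvDashes [] i = [] := rfl

theorem pvDashes_cons (c : Char) (rest : List Char) (i : Int) :
    pvDashes (c :: rest) i =
      (if c == '-' then [i] else []) ++ pvDashes rest (i + 1) := by
  simp [pvDashes, PySem.List.enumerate_cons]
  by_cases h : c = '-' <;> simp [h]

/-- characterisation of A's loop -/
theorem pvGoA_eq (l : List Char) (i cnt : Int) :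
    pvGoA l i cnt =
      ((pvDashes l i).all (fun x => pvSeperatorIndexes.contains x) &&
        decide ((3 : Int) = cnt + (pvDashes l i).length)) := by
  induction l generalizing i cnt with
  | nil => simp [pvGoA, pvDashes_nil, pvSeperatorIndexes]
  | cons c rest ih =>
    by_cases h : c = '-'
    · by_cases hm : i ∈ pvSeperatorIndexes
      · simp [pvGoA, h, hm, pvDashes_cons, ih]
        congr 1
        simp only [decide_eq_decide]
        omega
      · simp [pvGoA, h, hm, pvDashes_cons]
    · simp [pvGoA, h, pvDashes_cons, ih]

theorem pvDashes_ge (l : List Char) (i : Int) :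
    ∀ x ∈ pvDashes l i, i ≤ x := by
  induction l generalizing i with
  | nil => simp [pvDashes_nil]
  | cons c rest ih =>
    intro x hx
    rw [pvDashes_cons] at hx
    rcases List.mem_append.mp hx with h1 | h2
    · by_cases h : c = '-' <;> simp [h] at h1; omega
    · have := ih (i + 1) x h2; omega

theorem pvDashes_pairwise (l : List Char) (i : Int) :
    (pvDashes l i).Pairwise (· < ·) := by
  induction l generalizing i with
  | nil => simp [pvDashes_nil]
  | cons c rest ih =>
    rw [pvDashes_cons]
    by_cases h : c = '-'
    · simp only [h]
      simp only [beq_self_eq_true, if_pos]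
      refine List.pairwise_cons.mpr ⟨?_, ih (i + 1)⟩
      intro x hx
      have : i + 1 ≤ x := pvDashes_ge rest (i + 1) x hx
      omega
    · simp [h, ih]

theorem pvNodup_subset_len (d : List Int) (hnd : d.Nodup)
    (hsub : ∀ x ∈ d, x ∈ pvSeperatorIndexes) :
    ((d.length : Int) = 3) ↔ (1 ∈ d ∧ 5 ∈ d ∧ 11 ∈ d) := by
  have hcard : d.length = d.toFinset.card := (List.toFinset_card_of_nodup hnd).symm
  have hsubF : d.toFinset ⊆ ({1, 5, 11} : Finset Int) := by
    intro x hx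
    have := hsub x (List.mem_toFinset.mp hx)
    simp [pvSeperatorIndexes] at this
    simp [Finset.mem_insert]
    tauto
  have hc3 : ({1, 5, 11} : Finset Int).card = 3 := by decide
  constructor
  · intro h
    have heq : d.toFinset = ({1, 5, 11} : Finset Int) :=
      Finset.eq_of_subset_of_card_le hsubF (by omega)
    refine ⟨?_, ?_, ?_⟩ <;>
      · rw [← List.mem_toFinset, heq]; decide
  · rintro ⟨h1, h5, h11⟩
    have hsupF : ({1, 5, 11} : Finset Int) ⊆ d.toFinset := by
      intro x hx
      simp [Finset.mem_insert] at hx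
      rcases hx with rfl | rfl | rfl <;> simp [h1, h5, h11]
    have heq : d.toFinset = ({1, 5, 11} : Finset Int) :=
      Finset.Subset.antisymm hsubF hsupF
    rw [hcard, heq, hc3]
    norm_num

-- ===== VERDICT (by name: the statement is the Claim_ definition above) =====
theorem are_seperators_in_correct_positions_spec : Claim_equal_are_seperators_in_correct_positions := by
  intro s _
  show are_seperators_in_correct_positions s = are_seperators_in_correct_positions_alt s
  have halt : are_seperators_in_correct_positions_alt s =
      PySem.Set.equal (PySem.Set.ofList (pvDashes s.toList 0))
        (PySem.Set.ofList pvSeperatorIndexes) := rfl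
  rw [are_seperators_in_correct_positions, halt, pvGoA_eq]
  set d := pvDashes s.toList 0 with hd
  have hnd : d.Nodup :=
    List.Pairwise.imp (fun h => Int.ne_of_lt h) (pvDashes_pairwise s.toList 0)
  by_cases hsub : ∀ x ∈ d, x ∈ pvSeperatorIndexes
  · have hall : d.all (fun x => pvSeperatorIndexes.contains x) = true := by
      simp only [List.all_eq_true]
      intro x hx; simpa using hsub x hx
    rw [hall, Bool.true_and, Bool.eq_iff_iff]
    simp only [decide_eq_true_eq, PySem.Set.equal_iff, PySem.Set.mem_ofList]
    have hlen := pvNodup_subset_len d hnd hsub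
    constructor
    · intro h x
      obtain ⟨h1, h5, h11⟩ := hlen.mp (by omega)
      constructor
      · exact fun hx => hsub x hx
      · intro hx
        simp [pvSeperatorIndexes] at hx
        rcases hx with rfl | rfl | rfl <;> assumption
    · intro h
      have h3 := hlen.mpr ⟨(h 1).mpr (by simp [pvSeperatorIndexes]),
        (h 5).mpr (by simp [pvSeperatorIndexes]),
        (h 11).mpr (by simp [pvSeperatorIndexes])⟩
      omega
  · push_neg at hsub
    obtain ⟨x, hxd, hxn⟩ := hsub
    have hall : d.all (fun y => pvSeperatorIndexes.contains y) = false := by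
      simp only [List.all_eq_false]
      exact ⟨x, hxd, by simpa using hxn⟩
    rw [hall, Bool.false_and]
    symm
    rw [← Bool.not_eq_true, PySem.Set.equal_iff]
    simp only [PySem.Set.mem_ofList]
    intro hiff
    exact hxn ((hiff x).mp hxd)
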